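-- pv_equiv track=rewrite | github.com/ssf2xguile/LT4Code-for-MyResearch | LT4Code-main/RQ4/Tail-detection/code/createTestData.py | parse_string_into_apis
-- ===== SOURCE A (Python) =====
-- def parse_string_into_apis(str_):
--     apis = []
--     eles = str_.split('\t')[0].strip().split('.')
--     first_lib = eles[0]
--
--     for i in range(1, len(eles) - 1):
--         try:
--             module_, library_ = eles[i].strip().rsplit(' ')
--         except ValueError:
--             try:
--                 module_, library_ = eles[i].strip().split(' ', 1)
--             except ValueError:
--                 module_ = eles[i].strip()
--                 library_ = ''
--
--         api = first_lib.strip() + '.' + module_.strip()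
--         api = api.lower().replace(' ', '')
--         apis.append(api)
--         first_lib = library_ if library_ else module_
--
--     api = first_lib.strip() + '.' + eles[-1].strip()
--     api = api.lower().replace(' ', '')
--     apis.append(api)
--     return apis
-- ===== SOURCE B (Python) =====
-- def _mod_lib(e):
--     s = e.strip()
--     parts = s.split(' ')
--     if len(parts) != 2:
--         parts = s.split(' ', 1)
--         if len(parts) != 2:
--             parts = [s, '']
--     return parts[0], parts[1]
--
--
-- def parse_string_into_apis(str_):
--     eles = str_.split('\t')[0].strip().split('.')
--     mid = [_mod_lib(e) for e in eles[1:-1]]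
--     prefixes = [eles[0]] + [lib if lib else mod for mod, lib in mid]
--     targets = [mod for mod, _ in mid] + [eles[-1]]
--     return [(p.strip() + '.' + t.strip()).lower().replace(' ', '')
--             for p, t in zip(prefixes, targets)]
-- ===== Notes on version B (the rewrite author's own statement) =====
-- stated objective: alternative
-- what changed: B eliminates A's state-threading loop entirely: it first parses each middle element independently into a (module, library) pair, then builds the full prefix list and target list as two independent map expressions and zips them, so each api is computed positionally from adjacent elements with no running first_lib accumulator.
import Mathlib
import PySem

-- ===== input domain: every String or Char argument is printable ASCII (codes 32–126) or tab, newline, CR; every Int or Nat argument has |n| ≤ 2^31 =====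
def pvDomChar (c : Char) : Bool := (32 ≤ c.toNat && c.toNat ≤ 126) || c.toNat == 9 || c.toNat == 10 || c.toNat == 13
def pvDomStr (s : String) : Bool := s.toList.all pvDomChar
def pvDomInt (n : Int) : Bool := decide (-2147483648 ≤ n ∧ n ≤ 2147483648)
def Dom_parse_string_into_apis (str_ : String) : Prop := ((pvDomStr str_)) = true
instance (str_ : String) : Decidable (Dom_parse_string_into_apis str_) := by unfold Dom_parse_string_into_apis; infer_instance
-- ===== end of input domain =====

-- B replaces A's stateful loop by a stateless zip of an independently computed prefix list
-- with a target list; objective: alternative decomposition, same return value.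

-- ===== PORT A =====
-- rsplit(' ') with no maxsplit yields the same parts as split(' '), so it is ported with
-- PySem.Str.split?; the 2-element tuple unpacking (ValueError otherwise) is the `some [m, l]` match.
def parse_string_into_apis (str_ : String) : List String :=
  let eles : List String :=
    (PySem.Str.split? (PySem.Str.strip (PySem.List.pyGetD ((PySem.Str.split? str_ "\t").getD []) 0 "")) ".").getD []
  let first_lib := PySem.List.pyGetD eles 0 ""
  let st := (PySem.List.pyRange 1 (PySem.List.len eles - 1)).foldl
    (fun (st : List String × String) (i : Int) =>
      let (module_, library_) :=
        match PySem.Str.split? (PySem.Str.strip (PySem.List.pyGetD eles i "")) " " with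
        | some [m, l] => (m, l)
        | _ =>
          match PySem.Str.splitMax? (PySem.Str.strip (PySem.List.pyGetD eles i "")) " " 1 with
          | some [m, l] => (m, l)
          | _ => (PySem.Str.strip (PySem.List.pyGetD eles i ""), "")
      let api := PySem.Str.replace (PySem.Str.lower (PySem.Str.strip st.2 ++ "." ++ PySem.Str.strip module_)) " " ""
      (st.1 ++ [api], if library_ = "" then module_ else library_))
    ([], first_lib)
  let api := PySem.Str.replace (PySem.Str.lower (PySem.Str.strip st.2 ++ "." ++ PySem.Str.strip (PySem.List.pyGetD eles (-1) ""))) " " ""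
  st.1 ++ [api]

-- ===== PORT B =====
def pvModLib (e : String) : String × String :=
  let s := PySem.Str.strip e
  let p1 := (PySem.Str.split? s " ").getD []
  let parts :=
    if p1.length = 2 then p1
    else
      let p2 := (PySem.Str.splitMax? s " " 1).getD []
      if p2.length = 2 then p2 else [s, ""]
  (PySem.List.pyGetD parts 0 "", PySem.List.pyGetD parts 1 "")

def parse_string_into_apis_alt (str_ : String) : List String :=
  let eles : List String :=
    (PySem.Str.split? (PySem.Str.strip (PySem.List.pyGetD ((PySem.Str.split? str_ "\t").getD []) 0 "")) ".").getD []
  let mid := (PySem.List.slice eles (some 1) (some (-1))).map pvModLib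
  let prefixes := [PySem.List.pyGetD eles 0 ""] ++ mid.map (fun p => if p.2 = "" then p.1 else p.2)
  let targets := mid.map Prod.fst ++ [PySem.List.pyGetD eles (-1) ""]
  (List.zip prefixes targets).map
    (fun pt => PySem.Str.replace (PySem.Str.lower (PySem.Str.strip pt.1 ++ "." ++ PySem.Str.strip pt.2)) " " "")

-- ===== PRECONDITION & SPEC =====
def Spec_parse_string_into_apis (str_ : String) (out : List String) : Prop := out = parse_string_into_apis_alt str_
instance (str_ : String) (out : List String) : Decidable (Spec_parse_string_into_apis str_ out) := by unfold Spec_parse_string_into_apis; infer_instance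

-- ===== CLAIM (what is proved, stated in full; the proofs are below) =====
def Claim_equal_parse_string_into_apis : Prop := ∀ (str_ : String), Dom_parse_string_into_apis str_ → Spec_parse_string_into_apis str_ (parse_string_into_apis str_)

-- ===== LEMMAS AND PROOFS =====

-- splitOn.go: the accumulator only collects finished pieces.
theorem pvGoAcc (sep : List Char) (fuel : Nat) (l cur : List Char) (acc : List (List Char)) :
    PySem.Chars.splitOn.go sep fuel l cur acc
      = acc.reverse ++ PySem.Chars.splitOn.go sep fuel l cur [] := by
  induction fuel generalizing l cur acc with
  | zero => simp [PySem.Chars.splitOn.go]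
  | succ fuel ih =>
    cases l with
    | nil => simp [PySem.Chars.splitOn.go]
    | cons c rest =>
      simp only [PySem.Chars.splitOn.go]
      split
      · rw [ih _ _ (_ :: acc), ih _ _ [_]]; simp
      · exact ih _ _ _

-- splitOnMax.go with maxsplit 0 lumps the whole remainder into one last piece.
theorem pvGoZero (sep : List Char) (fuel : Nat) (l cur : List Char) (acc : List (List Char)) :
    PySem.Chars.splitOnMax.go sep fuel 0 l cur acc = ((cur.reverse ++ l) :: acc).reverse := by
  cases fuel with
  | zero => simp [PySem.Chars.splitOnMax.go]
  | succ fuel => cases l <;> simp [PySem.Chars.splitOnMax.go]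

-- splitOn.go never returns the empty list.
theorem pvGoNe (sep : List Char) (fuel : Nat) (l cur : List Char) :
    PySem.Chars.splitOn.go sep fuel l cur [] ≠ [] := by
  induction fuel generalizing l cur with
  | zero => simp [PySem.Chars.splitOn.go]
  | succ fuel ih =>
    cases l with
    | nil => simp [PySem.Chars.splitOn.go]
    | cons c rest =>
      simp only [PySem.Chars.splitOn.go]
      split
      · rw [pvGoAcc sep fuel _ [] [_]]; simp
      · exact ih rest (c :: cur)

-- joining splitOn.go's pieces with sep restores the input.
theorem pvGoJoin (sep : List Char) (fuel : Nat) (l cur : List Char) :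
    PySem.Chars.join sep (PySem.Chars.splitOn.go sep fuel l cur []) = cur.reverse ++ l := by
  induction fuel generalizing l cur with
  | zero => simp [PySem.Chars.splitOn.go, PySem.Chars.join_singleton]
  | succ fuel ih =>
    cases l with
    | nil => simp [PySem.Chars.splitOn.go, PySem.Chars.join_singleton]
    | cons c rest =>
      simp only [PySem.Chars.splitOn.go]
      split
      · rename_i hpre
        rw [pvGoAcc sep fuel _ [] [cur.reverse]]
        rcases hgo : PySem.Chars.splitOn.go sep fuel (List.drop sep.length (c :: rest)) [] [] with _ | ⟨a, as⟩
        · exact absurd hgo (pvGoNe _ _ _ _)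
        · have hj := ih (List.drop sep.length (c :: rest)) []
          rw [hgo] at hj
          simp only [List.reverse_nil, List.nil_append] at hj
          have hpe : sep ++ List.drop sep.length (c :: rest) = c :: rest :=
            List.prefix_iff_eq_append.mp (List.isPrefixOf_iff_prefix.mp hpre)
          simp only [List.reverse_cons, List.reverse_nil, List.nil_append, List.singleton_append,
            PySem.Chars.join_cons_cons, hj]
          rw [← hpe]
          simp [List.append_assoc]
      · rw [ih rest (c :: cur)]; simp

-- splitOnMax.go with maxsplit 1 = head of splitOn.go, rest re-joined.
theorem pvGoMax (sep : List Char) (fuel : Nat) (l cur : List Char) (acc : List (List Char)) :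
    PySem.Chars.splitOnMax.go sep fuel 1 l cur acc
      = acc.reverse ++ (match PySem.Chars.splitOn.go sep fuel l cur [] with
          | [] => []
          | a :: rest => a :: (if rest = [] then [] else [PySem.Chars.join sep rest])) := by
  induction fuel generalizing l cur acc with
  | zero => simp [PySem.Chars.splitOnMax.go, PySem.Chars.splitOn.go]
  | succ fuel ih =>
    cases l with
    | nil => simp [PySem.Chars.splitOnMax.go, PySem.Chars.splitOn.go]
    | cons c rest =>
      simp only [PySem.Chars.splitOnMax.go, PySem.Chars.splitOn.go]
      rw [if_neg (by decide : ¬ ((1 : Nat) = 0))]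
      split
      · rename_i hpre
        rw [(by decide : (1 : Nat) - 1 = 0), pvGoZero, pvGoAcc sep fuel _ [] [cur.reverse]]
        rcases hgo : PySem.Chars.splitOn.go sep fuel (List.drop sep.length (c :: rest)) [] [] with _ | ⟨a, as⟩
        · exact absurd hgo (pvGoNe _ _ _ _)
        · have hj := pvGoJoin sep fuel (List.drop sep.length (c :: rest)) []
          rw [hgo] at hj
          simp only [List.reverse_nil, List.nil_append] at hj
          simp [hj]
      · exact ih rest (c :: cur) acc

-- if splitOn yields exactly two pieces, split with maxsplit 1 yields the same two pieces.
theorem pvSplitMaxOfTwo (s sep x y : List Char) (h : PySem.Chars.splitOn s sep = [x, y]) :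
    PySem.Chars.splitOnMax s sep 1 = [x, y] := by
  unfold PySem.Chars.splitOn at h
  unfold PySem.Chars.splitOnMax
  rw [if_neg (by omega)]
  rw [(by decide : ((1 : Int)).toNat = 1), pvGoMax, h]
  simp [PySem.Chars.join_singleton]

-- A's try/except parsing chain equals B's split-list length tests, for any string s.
theorem pvParseEqGen (s : String) :
    (match PySem.Str.split? s " " with
      | some [m, l] => (m, l)
      | _ =>
        match PySem.Str.splitMax? s " " 1 with
        | some [m, l] => (m, l)
        | _ => (s, ""))
    = (let p1 := (PySem.Str.split? s " ").getD []
       let parts :=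
         if p1.length = 2 then p1
         else
           let p2 := (PySem.Str.splitMax? s " " 1).getD []
           if p2.length = 2 then p2 else [s, ""]
       (PySem.List.pyGetD parts 0 "", PySem.List.pyGetD parts 1 "")) := by
  have h1 : PySem.Str.split? s " "
      = some ((PySem.Chars.splitOn s.toList " ".toList).map String.ofList) := rfl
  have h2 : PySem.Str.splitMax? s " " 1
      = some ((PySem.Chars.splitOnMax s.toList " ".toList 1).map String.ofList) := rfl
  rw [h1, h2]
  rcases hsp : PySem.Chars.splitOn s.toList " ".toList with _ | ⟨a, _ | ⟨b, _ | ⟨c, ds⟩⟩⟩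
  · rcases PySem.Chars.splitOnMax s.toList " ".toList 1 with _ | ⟨u, _ | ⟨v, _ | ⟨w, es⟩⟩⟩ <;>
      simp [PySem.List.pyGetD, PySem.List.pyGet?, PySem.List.pyIdx?]
  · rcases PySem.Chars.splitOnMax s.toList " ".toList 1 with _ | ⟨u, _ | ⟨v, _ | ⟨w, es⟩⟩⟩ <;>
      simp [PySem.List.pyGetD, PySem.List.pyGet?, PySem.List.pyIdx?]
  · rw [pvSplitMaxOfTwo s.toList " ".toList a b hsp]
    simp [PySem.List.pyGetD, PySem.List.pyGet?, PySem.List.pyIdx?]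
  · rcases PySem.Chars.splitOnMax s.toList " ".toList 1 with _ | ⟨u, _ | ⟨v, _ | ⟨w, es⟩⟩⟩ <;>
      simp [PySem.List.pyGetD, PySem.List.pyGet?, PySem.List.pyIdx?]

-- specialised to strip(e): the chain equals pvModLib e.
theorem pvParseEq (e : String) :
    (match PySem.Str.split? (PySem.Str.strip e) " " with
      | some [m, l] => (m, l)
      | _ =>
        match PySem.Str.splitMax? (PySem.Str.strip e) " " 1 with
        | some [m, l] => (m, l)
        | _ => (PySem.Str.strip e, ""))
    = pvModLib e := pvParseEqGen (PySem.Str.strip e)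

-- the loop index range, read through eles, is exactly the slice eles[1:-1].
theorem pvRangeSlice {α : Type} (xs : List α) (d : α) :
    (PySem.List.pyRange 1 (PySem.List.len xs - 1)).map (fun i => PySem.List.pyGetD xs i d)
      = PySem.List.slice xs (some 1) (some (-1)) := by
  cases xs with
  | nil => rfl
  | cons e0 rest =>
    have hrange : PySem.List.pyRange 1 (PySem.List.len (e0 :: rest) - 1)
        = (List.range (rest.length - 1)).map (fun k : Nat => 1 + 1 * (k : Int)) := by
      simp only [PySem.List.pyRange, PySem.List.len, List.length_cons]
      rw [if_neg (by norm_num), if_pos (by norm_num)]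
      by_cases hr : 1 < rest.length
      · rw [if_pos (by push_cast; omega)]
        congr 2
        simp only [Int.ediv_one]
        omega
      · rw [if_neg (by push_cast; omega)]
        rw [Nat.sub_eq_zero_of_le (by omega)]
    have hslice : PySem.List.slice (e0 :: rest) (some 1) (some (-1))
        = rest.take (rest.length - 1) := by
      have ha : PySem.List.clampIdx (e0 :: rest).length 1 = 1 := by
        simp [PySem.List.clampIdx]
      have hb : PySem.List.clampIdx (e0 :: rest).length (-1) = rest.length := by
        simp only [PySem.List.clampIdx, List.length_cons]
        rw [if_pos (by omega), if_neg (by omega)]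
        omega
      simp only [PySem.List.slice, ha, hb]
      simp
    rw [hrange, hslice]
    apply List.ext_getElem
    · simp
    · intro i h1 h2
      simp only [List.getElem_map, List.getElem_range, List.getElem_take]
      have hi : i < rest.length - 1 := by simpa using h1
      rw [PySem.List.pyGetD_of_nonneg (e0 :: rest) d (by omega)]
      have ht : ((1 + 1 * (i : Int))).toNat = i + 1 := by omega
      rw [ht, List.getD_cons_succ, List.getD_eq_getElem _ _ (by omega)]

-- abbreviations used only by the proofs below
def pvNorm (a b : String) : String :=
  PySem.Str.replace (PySem.Str.lower (PySem.Str.strip a ++ "." ++ PySem.Str.strip b)) " " ""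

def pvStep (st : List String × String) (p : String × String) : List String × String :=
  (st.1 ++ [pvNorm st.2 p.1], if p.2 = "" then p.1 else p.2)

-- the fold's list component factors through its initial accumulator.
theorem pvFoldAcc (ps : List (String × String)) (acc : List String) (l : String) :
    ps.foldl pvStep (acc, l)
      = (acc ++ (ps.foldl pvStep ([], l)).1, (ps.foldl pvStep ([], l)).2) := by
  induction ps generalizing acc l with
  | nil => simp
  | cons p ps ih =>
    simp only [List.foldl_cons, pvStep]
    rw [ih (acc ++ [pvNorm l p.1]), ih ([] ++ [pvNorm l p.1])]
    simp

-- A's state-threading fold equals B's zip of the prefix list with the target list.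
theorem pvZipFold (ps : List (String × String)) (l0 last : String) :
    (ps.foldl pvStep ([], l0)).1 ++ [pvNorm (ps.foldl pvStep ([], l0)).2 last]
      = (List.zip (l0 :: ps.map (fun p => if p.2 = "" then p.1 else p.2))
          (ps.map Prod.fst ++ [last])).map (fun pt => pvNorm pt.1 pt.2) := by
  induction ps generalizing l0 with
  | nil => simp
  | cons p ps ih =>
    simp only [List.foldl_cons, pvStep, List.map_cons, List.cons_append, List.zip_cons_cons,
      List.nil_append, List.map]
    rw [pvFoldAcc ps [pvNorm l0 p.1] (if p.2 = "" then p.1 else p.2)]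
    simp only [List.cons_append, List.nil_append]
    rw [← ih (if p.2 = "" then p.1 else p.2)]

-- ===== VERDICT (by name: the statement is the Claim_ definition above) =====
set_option maxHeartbeats 2000000 in
theorem parse_string_into_apis_spec : Claim_equal_parse_string_into_apis := by
  intro str_ _
  show parse_string_into_apis str_ = parse_string_into_apis_alt str_
  simp only [parse_string_into_apis, parse_string_into_apis_alt]
  generalize ((PySem.Str.split? (PySem.Str.strip (PySem.List.pyGetD ((PySem.Str.split? str_ "\t").getD []) 0 "")) ".").getD [] : List String) = eles
  have h1 : (PySem.List.pyRange 1 (PySem.List.len eles - 1)).foldl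
      (fun (st : List String × String) (i : Int) =>
        let (module_, library_) :=
          match PySem.Str.split? (PySem.Str.strip (PySem.List.pyGetD eles i "")) " " with
          | some [m, l] => (m, l)
          | _ =>
            match PySem.Str.splitMax? (PySem.Str.strip (PySem.List.pyGetD eles i "")) " " 1 with
            | some [m, l] => (m, l)
            | _ => (PySem.Str.strip (PySem.List.pyGetD eles i ""), "")
        let api := PySem.Str.replace (PySem.Str.lower (PySem.Str.strip st.2 ++ "." ++ PySem.Str.strip module_)) " " ""
        (st.1 ++ [api], if library_ = "" then module_ else library_))
      ([], PySem.List.pyGetD eles 0 "")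
      = ((PySem.List.slice eles (some 1) (some (-1))).map pvModLib).foldl pvStep
          ([], PySem.List.pyGetD eles 0 "") := by
    rw [← pvRangeSlice eles "", List.foldl_map, List.foldl_map]
    apply PySem.List.foldl_congr_mem
    intro st i _
    rw [pvParseEq (PySem.List.pyGetD eles i "")]
    rcases h : pvModLib (PySem.List.pyGetD eles i "") with ⟨m, l⟩
    simp [pvStep, pvNorm]
  rw [h1]
  have h2 := pvZipFold ((PySem.List.slice eles (some 1) (some (-1))).map pvModLib)
    (PySem.List.pyGetD eles 0 "") (PySem.List.pyGetD eles (-1) "")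
  simp only [pvNorm] at h2
  simpa [List.singleton_append] using h2
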